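-- pv_equiv track=rewrite | github.com/pypi-data/pypi-mirror-379 | packages/uvnote/uvnote-0.3.1-py3-none-any.whl/uvnote/generator.py | split_uv_install_logs
-- ===== SOURCE A (Python) =====
-- def split_uv_install_logs(stderr: str) -> tuple[str, str]:
--     """Split stderr into UV install logs and regular stderr.
--
--     Returns:
--         (uv_install_logs, regular_stderr)
--     """
--     lines = stderr.split('\n')
--     uv_logs = []
--     regular_logs = []
--     in_uv_section = True
--
--     for line in lines:
--         if in_uv_section:
--             uv_logs.append(line)
--             # Check if we've reached the end of UV install logs
--             if line.startswith('Installed '):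
--                 in_uv_section = False
--         else:
--             regular_logs.append(line)
--
--     # If we never found "Installed", treat it all as regular stderr
--     if in_uv_section:
--         return "", stderr
--
--     return '\n'.join(uv_logs), '\n'.join(regular_logs).strip()
-- ===== SOURCE B (Python) =====
-- def split_uv_install_logs(stderr: str) -> tuple[str, str]:
--     """Split stderr into UV install logs and regular stderr."""
--     lines = stderr.split('\n')
--     idx = next((i for i, l in enumerate(lines) if l.startswith('Installed ')), None)
--     if idx is None:
--         return "", stderr
--     return '\n'.join(lines[:idx + 1]), '\n'.join(lines[idx + 1:]).strip()
-- ===== Notes on version B (the rewrite author's own statement) =====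
-- stated objective: simpler
-- what changed: Replaces the stateful two-accumulator loop with an index search for the first 'Installed ' line followed by two slices, dropping the in_uv_section flag and per-line appends.
import Mathlib
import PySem

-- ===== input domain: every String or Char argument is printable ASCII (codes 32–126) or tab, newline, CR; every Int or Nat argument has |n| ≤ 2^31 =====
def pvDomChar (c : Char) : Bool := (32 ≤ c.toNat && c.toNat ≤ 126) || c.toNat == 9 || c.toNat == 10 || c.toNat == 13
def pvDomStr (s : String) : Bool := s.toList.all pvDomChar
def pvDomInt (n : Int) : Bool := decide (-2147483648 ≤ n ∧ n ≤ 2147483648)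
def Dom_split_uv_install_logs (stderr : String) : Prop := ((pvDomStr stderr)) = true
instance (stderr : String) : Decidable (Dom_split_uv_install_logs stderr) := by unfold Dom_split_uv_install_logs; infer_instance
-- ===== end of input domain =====

-- B replaces A's stateful two-accumulator scan with an index search for the first
-- 'Installed ' line plus two slices (objective: simpler decomposition, same cost).


-- ===== PORT A =====
-- the for-loop over lines, carrying (uv_logs, regular_logs, in_uv_section)
def pvGoA (lines : List String) (uv regular : List String) (inUv : Bool) :
    List String × List String × Bool :=
  match lines with
  | [] => (uv, regular, inUv)
  | l :: rest =>
    if inUv then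
      if PySem.Str.startswith l "Installed " then
        pvGoA rest (uv ++ [l]) regular false
      else
        pvGoA rest (uv ++ [l]) regular true
    else
      pvGoA rest uv (regular ++ [l]) inUv

def split_uv_install_logs (stderr : String) : String × String :=
  let lines := (PySem.Str.split? stderr "\n").getD []  -- exact: sep "\n" ≠ "" so split? is always some
  let r := pvGoA lines [] [] true
  if r.2.2 then ("", stderr)
  else (PySem.Str.join "\n" r.1, PySem.Str.strip (PySem.Str.join "\n" r.2.1))

-- ===== PORT B =====
def split_uv_install_logs_alt (stderr : String) : String × String :=
  let lines := (PySem.Str.split? stderr "\n").getD []  -- exact: sep "\n" ≠ "" so split? is always some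
  match lines.findIdx? (fun l => PySem.Str.startswith l "Installed ") with
  | none => ("", stderr)
  | some i => (PySem.Str.join "\n" (lines.take (i + 1)),
               PySem.Str.strip (PySem.Str.join "\n" (lines.drop (i + 1))))

-- ===== PRECONDITION & SPEC =====
def Spec_split_uv_install_logs (stderr : String) (out : String × String) : Prop := out = split_uv_install_logs_alt stderr
instance (stderr : String) (out : String × String) : Decidable (Spec_split_uv_install_logs stderr out) := by unfold Spec_split_uv_install_logs; infer_instance

-- ===== CLAIM (what is proved, stated in full; the proofs are below) =====
def Claim_equal_split_uv_install_logs : Prop := ∀ (stderr : String), Dom_split_uv_install_logs stderr → Spec_split_uv_install_logs stderr (split_uv_install_logs stderr)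

-- ===== LEMMAS AND PROOFS =====
theorem pvGoA_false (lines : List String) (uv regular : List String) :
    pvGoA lines uv regular false = (uv, regular ++ lines, false) := by
  induction lines generalizing regular with
  | nil => simp [pvGoA]
  | cons l rest ih => simp [pvGoA, ih]

theorem pvGoA_true (lines : List String) (uv : List String) :
    pvGoA lines uv [] true =
      match lines.findIdx? (fun l => PySem.Str.startswith l "Installed ") with
      | none => (uv ++ lines, [], true)
      | some i => (uv ++ lines.take (i + 1), lines.drop (i + 1), false) := by
  induction lines generalizing uv with
  | nil => simp [pvGoA]
  | cons l rest ih =>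
    simp only [pvGoA, List.findIdx?_cons]
    by_cases h : PySem.Str.startswith l "Installed " = true
    · simp only [h, if_true, pvGoA_false]
      simp
    · simp only [h, Bool.false_eq_true, if_false, ih]
      cases hf : rest.findIdx? (fun l => PySem.Str.startswith l "Installed ") with
      | none => simp
      | some i => simp [List.take_succ_cons, List.drop_succ_cons]

-- ===== VERDICT (by name: the statement is the Claim_ definition above) =====
theorem split_uv_install_logs_spec : Claim_equal_split_uv_install_logs := by
  intro stderr _
  unfold Spec_split_uv_install_logs split_uv_install_logs split_uv_install_logs_alt
  simp only [pvGoA_true]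
  cases hf : ((PySem.Str.split? stderr "\n").getD []).findIdx?
      (fun l => PySem.Str.startswith l "Installed ") with
  | none => simp
  | some i => simp
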